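-- pv_equiv track=rewrite | github.com/vivirus06/infdzlections | 40.py | noise_level_description
-- ===== SOURCE A (Python) =====
-- def noise_level_description(db):
--     noise_levels = {
--         0: "Тишина",
--         10: "Шепот",
--         30: "Обычный разговор",
--         60: "Шумный офис",
--         80: "Громкий концерт",
--         100: "Двигатель самолета на взлете"
--     }
--
--     min_db = min(noise_levels.keys())
--     max_db = max(noise_levels.keys())
--
--     if db < min_db:
--         return f"Уровень шума ниже минимального ({min_db} дБ)."
--     elif db > max_db:
--         return f"Уровень шума выше максимального ({max_db} дБ)."
--     elif db in noise_levels: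
--         return f"{db} дБ соответствует: {noise_levels[db]}."
--     else:
--         lower = max([key for key in noise_levels.keys() if key < db], default=None)
--         upper = min([key for key in noise_levels.keys() if key > db], default=None)
--
--         if lower is not None and upper is not None:
--             return f"Уровень шума {db} дБ находится между {lower} дБ ({noise_levels[lower]}) и {upper} дБ ({noise_levels[upper]})."
--         else:
--             return "Не удалось определить уровни шума."
-- ===== SOURCE B (Python) =====
-- KEYS = [0, 10, 30, 60, 80, 100]
-- DESCS = ["Тишина", "Шепот", "Обычный разговор", "Шумный офис",
--          "Громкий концерт", "Двигатель самолета на взлете"]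
--
-- def noise_level_description(db):
--     if db < KEYS[0]:
--         return f"Уровень шума ниже минимального ({KEYS[0]} дБ)."
--     if db > KEYS[-1]:
--         return f"Уровень шума выше максимального ({KEYS[-1]} дБ)."
--     # binary search: leftmost index with KEYS[idx] >= db (bisect_left by hand)
--     lo, hi = 0, len(KEYS)
--     while lo < hi:
--         mid = (lo + hi) // 2
--         if KEYS[mid] < db:
--             lo = mid + 1
--         else:
--             hi = mid
--     if KEYS[lo] == db:
--         return f"{db} дБ соответствует: {DESCS[lo]}."
--     return (f"Уровень шума {db} дБ находится между {KEYS[lo-1]} дБ "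
--             f"({DESCS[lo-1]}) и {KEYS[lo]} дБ ({DESCS[lo]}).")
-- ===== Notes on version B (the rewrite author's own statement) =====
-- stated objective: idiomatic
-- what changed: Replaces the dict plus min()/max() and the two max/min list-comprehension rescans for neighbours with a sorted key list and a single hand-written bisect_left binary search; the exact match and both neighbours are read off the one insertion index.
import Mathlib
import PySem

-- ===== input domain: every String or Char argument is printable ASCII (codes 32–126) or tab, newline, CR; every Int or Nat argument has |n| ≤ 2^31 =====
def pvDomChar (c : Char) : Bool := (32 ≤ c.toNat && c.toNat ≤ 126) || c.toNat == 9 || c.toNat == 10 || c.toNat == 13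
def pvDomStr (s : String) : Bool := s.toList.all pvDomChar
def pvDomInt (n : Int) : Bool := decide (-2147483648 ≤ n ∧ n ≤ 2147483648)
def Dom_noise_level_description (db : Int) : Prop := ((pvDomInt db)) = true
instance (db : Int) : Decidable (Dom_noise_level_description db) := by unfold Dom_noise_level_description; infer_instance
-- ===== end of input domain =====

set_option maxRecDepth 4000


-- B replaces the dict plus the two max/min comprehension rescans by one hand-written
-- binary search over the sorted key list (idiomatic bisect_left); same return values.

-- ===== PORT A =====
def noise_level_description (db : Int) : String :=
  let noise_levels : PySem.Dict Int String := PySem.Dict.ofList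
    [(0, "Тишина"), (10, "Шепот"), (30, "Обычный разговор"),
     (60, "Шумный офис"), (80, "Громкий концерт"), (100, "Двигатель самолета на взлете")]
  -- min()/max() of the (nonempty) key list; Python's min/max raise only on empty input
  let min_db : Int := ((PySem.List.min? noise_levels.keys (fun x => x))).getD 0
  let max_db : Int := ((PySem.List.max? noise_levels.keys (fun x => x))).getD 0
  if db < min_db then
    "Уровень шума ниже минимального (" ++ PySem.Int.toStr min_db ++ " дБ)."
  else if db > max_db then
    "Уровень шума выше максимального (" ++ PySem.Int.toStr max_db ++ " дБ)."
  else if noise_levels.contains db then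
    -- noise_levels[db]: key present in this branch, so getD never uses the default
    PySem.Int.toStr db ++ " дБ соответствует: " ++ noise_levels.getD db "" ++ "."
  else
    let lower := PySem.List.max? (noise_levels.keys.filter (fun k => k < db)) (fun x => x)
    let upper := PySem.List.min? (noise_levels.keys.filter (fun k => k > db)) (fun x => x)
    match lower, upper with
    | some l, some u =>
        "Уровень шума " ++ PySem.Int.toStr db ++ " дБ находится между " ++
        PySem.Int.toStr l ++ " дБ (" ++ noise_levels.getD l "" ++ ") и " ++
        PySem.Int.toStr u ++ " дБ (" ++ noise_levels.getD u "" ++ ")."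
    | _, _ => "Не удалось определить уровни шума."

-- ===== PORT B =====
def pvKeysB : List Int := [0, 10, 30, 60, 80, 100]
def pvDescsB : List String :=
  ["Тишина", "Шепот", "Обычный разговор", "Шумный офис",
   "Громкий концерт", "Двигатель самолета на взлете"]

-- the while-loop of Source B's hand-written bisect_left; KEYS[mid] is always in range.
-- Structural recursion on the fuel hi - lo (the loop shrinks hi - lo by ≥ 1 per step,
-- so the fuel never runs out before lo < hi fails).
def pvBisectLoop : Nat → Int → Nat → Nat → Nat
  | 0, _, lo, _ => lo
  | fuel + 1, db, lo, hi =>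
    if lo < hi then
      if pvKeysB.getD ((lo + hi) / 2) 0 < db then pvBisectLoop fuel db ((lo + hi) / 2 + 1) hi
      else pvBisectLoop fuel db lo ((lo + hi) / 2)
    else lo

def pvBisect (db : Int) (lo hi : Nat) : Nat := pvBisectLoop (hi - lo) db lo hi

def noise_level_description_alt (db : Int) : String :=
  -- KEYS[0] / KEYS[-1]: constant in-range indices
  if db < pvKeysB.getD 0 0 then
    "Уровень шума ниже минимального (" ++ PySem.Int.toStr (pvKeysB.getD 0 0) ++ " дБ)."
  else if db > (PySem.List.pyGet? pvKeysB (-1)).getD 0 then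
    "Уровень шума выше максимального (" ++
      PySem.Int.toStr ((PySem.List.pyGet? pvKeysB (-1)).getD 0) ++ " дБ)."
  else
    let lo := pvBisect db 0 pvKeysB.length
    -- KEYS[lo], KEYS[lo-1], DESCS[lo], DESCS[lo-1]: in range in these branches
    if pvKeysB.getD lo 0 == db then
      PySem.Int.toStr db ++ " дБ соответствует: " ++ pvDescsB.getD lo "" ++ "."
    else
      "Уровень шума " ++ PySem.Int.toStr db ++ " дБ находится между " ++
      PySem.Int.toStr (pvKeysB.getD (lo - 1) 0) ++ " дБ (" ++ pvDescsB.getD (lo - 1) "" ++ ") и " ++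
      PySem.Int.toStr (pvKeysB.getD lo 0) ++ " дБ (" ++ pvDescsB.getD lo "" ++ ")."

-- ===== PRECONDITION & SPEC =====
def Spec_noise_level_description (db : Int) (out : String) : Prop := out = noise_level_description_alt db
instance (db : Int) (out : String) : Decidable (Spec_noise_level_description db out) := by unfold Spec_noise_level_description; infer_instance

-- ===== CLAIM (what is proved, stated in full; the proofs are below) =====
def Claim_equal_noise_level_description : Prop := ∀ (db : Int), Dom_noise_level_description db → Spec_noise_level_description db (noise_level_description db)
-- ===== LEMMAS AND PROOFS =====
lemma pv_min_eq : ((PySem.List.min? (PySem.Dict.ofList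
    [((0:Int), "Тишина"), (10, "Шепот"), (30, "Обычный разговор"),
     (60, "Шумный офис"), (80, "Громкий концерт"),
     (100, "Двигатель самолета на взлете")]).keys (fun x => x)).getD 0) = (0:Int) := by decide

lemma pv_max_eq : ((PySem.List.max? (PySem.Dict.ofList
    [((0:Int), "Тишина"), (10, "Шепот"), (30, "Обычный разговор"),
     (60, "Шумный офис"), (80, "Громкий концерт"),
     (100, "Двигатель самолета на взлете")]).keys (fun x => x)).getD 0) = (100:Int) := by decide

lemma pv_eq_low (db : Int) (h : db < 0) :
    noise_level_description db = noise_level_description_alt db := by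
  unfold noise_level_description noise_level_description_alt
  simp only [pv_min_eq, pv_max_eq]
  rw [if_pos h, if_pos (show db < pvKeysB.getD 0 0 by simpa [pvKeysB] using h)]
  decide

lemma pv_eq_high (db : Int) (h0 : ¬ db < 0) (h : 100 < db) :
    noise_level_description db = noise_level_description_alt db := by
  unfold noise_level_description noise_level_description_alt
  simp only [pv_min_eq, pv_max_eq]
  rw [if_neg h0, if_neg (show ¬ db < pvKeysB.getD 0 0 by simpa [pvKeysB] using h0),
      if_pos h, if_pos (show db > (PySem.List.pyGet? pvKeysB (-1)).getD 0 by
        simpa [pvKeysB, PySem.List.pyGet?] using h)]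
  decide

-- ===== VERDICT (by name: the statement is the Claim_ definition above) =====
theorem noise_level_description_spec : Claim_equal_noise_level_description := by
  intro db _
  unfold Spec_noise_level_description
  by_cases h1 : db < 0
  · exact pv_eq_low db h1
  · by_cases h2 : 100 < db
    · exact pv_eq_high db h1 h2
    · interval_cases db <;> rfl
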